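-- pv_equiv track=rewrite | github.com/sonypark/Algorithm-playground | boostcamp/테스트1.py | solution
-- ===== SOURCE A (Python) =====
-- from collections import Counter
--
-- def solution(param):
--     c = Counter(param)
--     answer = []
--     visited = []
--     for v in param:
--         if v in visited: continue
--         val = c.get(v)
--         if val >=2:
--             answer.append(val)
--             visited.append(v)
--     if len(answer) ==0: return [-1]
--     return answer
-- ===== SOURCE B (Python) =====
-- from collections import Counter
--
-- def solution(param):
--     answer = [n for n in Counter(param).values() if n >= 2]
--     if not answer:
--         return [-1]
--     return answer
-- ===== Notes on version B (the rewrite author's own statement) =====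
-- stated objective: simpler
-- what changed: Drops the second scan over param and the 'v in visited' linear membership scan: B iterates once over the Counter's values (first-seen order), collecting counts >= 2.
import Mathlib
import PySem

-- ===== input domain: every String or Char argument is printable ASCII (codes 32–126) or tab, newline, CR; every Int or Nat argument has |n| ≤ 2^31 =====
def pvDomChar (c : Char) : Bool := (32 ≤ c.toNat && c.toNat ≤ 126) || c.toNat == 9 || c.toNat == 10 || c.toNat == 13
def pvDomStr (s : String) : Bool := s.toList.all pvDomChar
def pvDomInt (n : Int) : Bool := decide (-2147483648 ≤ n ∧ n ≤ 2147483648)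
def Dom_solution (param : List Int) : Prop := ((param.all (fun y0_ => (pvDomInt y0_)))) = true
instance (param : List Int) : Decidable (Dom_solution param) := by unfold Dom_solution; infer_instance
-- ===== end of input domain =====

-- B drops A's second scan over param and the 'visited' list: one pass over the Counter's values suffices (objective: simpler).

-- ===== PORT A =====
def solution (param : List Int) : List Int :=
  let c := PySem.Dict.counter param
  let st := param.foldl (fun (st : List Int × List Int) v =>
      if st.2.contains v then st
      else
        -- c.get(v): v ∈ param, so the lookup never yields None; getD 0 is exact here
        let val := c.getD v 0
        if 2 ≤ val then (st.1 ++ [val], st.2 ++ [v]) else st)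
    ([], [])
  if st.1.length = 0 then [-1] else st.1

-- ===== PORT B =====
def solution_alt (param : List Int) : List Int :=
  let answer := (PySem.Dict.counter param).values.filter (fun n => decide (2 ≤ n))
  if answer = [] then [-1] else answer

-- ===== PRECONDITION & SPEC =====
def Spec_solution (param : List Int) (out : List Int) : Prop := out = solution_alt param
instance (param : List Int) (out : List Int) : Decidable (Spec_solution param out) := by unfold Spec_solution; infer_instance

-- ===== CLAIM (what is proved, stated in full; the proofs are below) =====
def Claim_equal_solution : Prop := ∀ (param : List Int), Dom_solution param → Spec_solution param (solution param)

-- ===== LEMMAS AND PROOFS =====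

-- visited/answer after having consumed prefix s of the input, phrased against the full param
def pvVis (param s : List Int) : List Int :=
  (PySem.List.dedup s).filter (fun v => decide (2 ≤ param.count v))
def pvOut (param s : List Int) : List Int :=
  (pvVis param s).map (fun v => (param.count v : Int))

theorem dedup_snoc {α : Type} [DecidableEq α] (s : List α) (v : α) :
    PySem.List.dedup (s ++ [v]) =
      if v ∈ s then PySem.List.dedup s else PySem.List.dedup s ++ [v] := by
  simp only [PySem.List.dedup_eq_ofList, PySem.Set.ofList_eq_foldl, List.foldl_append,
    List.foldl_cons, List.foldl_nil]
  rw [← PySem.Set.ofList_eq_foldl]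
  simp [PySem.Set.add, PySem.Set.contains]

theorem loop_inv (param : List Int) :
    ∀ (l s : List Int), (∀ v, (s ++ l).count v ≤ param.count v) →
      l.foldl (fun (st : List Int × List Int) v =>
        if st.2.contains v then st
        else
          if 2 ≤ ((PySem.Dict.counter param).getD v 0) then
            (st.1 ++ [(PySem.Dict.counter param).getD v 0], st.2 ++ [v]) else st)
        (pvOut param s, pvVis param s)
      = (pvOut param (s ++ l), pvVis param (s ++ l)) := by
  intro l
  induction l with
  | nil => intro s _; simp
  | cons v l ih =>
    intro s hcnt
    have hgetD : (PySem.Dict.counter param).getD v 0 = (param.count v : Int) :=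
      PySem.Dict.getD_counter ..
    have hstep : (s ++ v :: l) = (s ++ [v]) ++ l := by simp
    have hcnt' : ∀ w, ((s ++ [v]) ++ l).count w ≤ param.count w := by
      intro w; rw [← hstep]; exact hcnt w
    have hIH := ih (s ++ [v]) hcnt'
    by_cases hvis : v ∈ pvVis param s
    · -- already visited: state unchanged, dedup unchanged
      have hvs : v ∈ s := by
        have := List.mem_filter.mp hvis
        exact (PySem.List.mem_dedup _ _).mp this.1
      have hd : pvVis param (s ++ [v]) = pvVis param s := by
        unfold pvVis; rw [dedup_snoc s v, if_pos hvs]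
      have hcontains : (pvVis param s).contains v = true := by
        simpa using hvis
      simp only [List.foldl_cons, hcontains, if_true]
      rw [hstep]
      rw [← hIH]
      simp [hd, pvOut]
    · by_cases h2 : 2 ≤ param.count v
      · -- new hit: v ∉ s (else it would be in pvVis)
        have hvs : v ∉ s := by
          intro hin
          exact hvis (List.mem_filter.mpr ⟨(PySem.List.mem_dedup _ _).mpr hin, by simpa using h2⟩)
        have hd : pvVis param (s ++ [v]) = pvVis param s ++ [v] := by
          unfold pvVis; rw [dedup_snoc s v, if_neg hvs]
          simp [h2]
        have hcontains : (pvVis param s).contains v = false := by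
          simpa using hvis
        have h2' : (2:Int) ≤ ((PySem.Dict.counter param).getD v 0) := by
          rw [hgetD]; exact_mod_cast h2
        simp only [List.foldl_cons, hcontains, Bool.false_eq_true, if_false, if_pos h2']
        rw [hstep, ← hIH]
        congr 2
        · unfold pvOut; rw [hd, hgetD]; simp
        · exact hd.symm
      · -- count < 2: nothing appended, and v cannot already be in s (count would be >= 2)
        have hvs : v ∉ s := by
          intro hin
          have : 2 ≤ (s ++ v :: l).count v := by
            have h1 : 1 ≤ s.count v := List.one_le_count_iff.mpr hin
            have h2'' : 1 ≤ (v :: l).count v := by simp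
            calc 2 ≤ s.count v + (v :: l).count v := by omega
              _ = (s ++ v :: l).count v := (List.count_append ..).symm
          exact h2 (le_trans this (hcnt v))
        have hd : pvVis param (s ++ [v]) = pvVis param s := by
          unfold pvVis; rw [dedup_snoc s v, if_neg hvs]
          simp [h2]
        have hcontains : (pvVis param s).contains v = false := by
          simpa using hvis
        have h2' : ¬ (2:Int) ≤ ((PySem.Dict.counter param).getD v 0) := by
          rw [hgetD]; exact_mod_cast h2
        simp only [List.foldl_cons, hcontains, Bool.false_eq_true, if_false, if_neg h2']
        rw [hstep, ← hIH]
        simp [hd, pvOut]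

theorem values_counter_eq (param : List Int) :
    (PySem.Dict.counter param).values
      = (PySem.List.dedup param).map (fun v => (param.count v : Int)) := by
  have h : (PySem.Dict.counter param).values = ((PySem.Dict.counter param).items).map (·.2) := rfl
  rw [h, PySem.Dict.items_counter]
  simp

theorem out_eq_filter_values (param : List Int) :
    pvOut param param = (PySem.Dict.counter param).values.filter (fun n => decide (2 ≤ n)) := by
  rw [values_counter_eq, List.filter_map]
  unfold pvOut pvVis
  congr 1
  apply List.filter_congr
  intro v _
  simp [Function.comp]

-- ===== VERDICT (by name: the statement is the Claim_ definition above) =====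
theorem solution_spec : Claim_equal_solution := by
  intro param _
  unfold Spec_solution solution solution_alt
  have hloop := loop_inv param param [] (by intro v; simp)
  have h0 : pvOut param [] = [] := by simp [pvOut, pvVis]
  have h1 : pvVis param [] = [] := by simp [pvVis]
  rw [h0, h1] at hloop
  simp only [List.nil_append] at hloop
  simp only [hloop, out_eq_filter_values param]
  rcases heq : (PySem.Dict.counter param).values.filter (fun n => decide (2 ≤ n)) with _ | ⟨a, t⟩ <;> simp
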